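-- pv_equiv track=rewrite | github.com/Neotys-Labs/neoload-cli | neoload/commands/report.py | get_trend_count_back_ahead
-- ===== SOURCE A (Python) =====
-- def get_trend_count_back_ahead(arr_directives):
--     count_back = 0 # negative
--     count_ahead = 0 # positive
--     for d in arr_directives:
--         if d.startswith("+") and is_integer(d):
--             count_ahead = int(d)
--         elif d.startswith("-") and is_integer(d):
--             count_back = int(d)
--
--     return (count_back, count_ahead)
--
-- def is_integer(s):
--     try:
--         int(s)
--         return True
--     except ValueError:
--         return False
-- ===== SOURCE B (Python) =====
-- def get_trend_count_back_ahead(arr_directives):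
--     count_back = 0
--     count_ahead = 0
--     have_back = False
--     have_ahead = False
--     for d in reversed(arr_directives):
--         if not have_ahead and d.startswith("+") and is_integer(d):
--             count_ahead = int(d)
--             have_ahead = True
--         elif not have_back and d.startswith("-") and is_integer(d):
--             count_back = int(d)
--             have_back = True
--         if have_back and have_ahead:
--             break
--     return (count_back, count_ahead)
--
-- def is_integer(s):
--     try:
--         int(s)
--         return True
--     except ValueError:
--         return False
-- ===== Notes on version B (the rewrite author's own statement) =====
-- stated objective: alternative
-- what changed: Instead of a full forward scan overwriting last matches, B scans the reversed list keeping first matches with found-flags and breaks early once both a '+' and a '-' integer directive are found.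
import Mathlib
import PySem

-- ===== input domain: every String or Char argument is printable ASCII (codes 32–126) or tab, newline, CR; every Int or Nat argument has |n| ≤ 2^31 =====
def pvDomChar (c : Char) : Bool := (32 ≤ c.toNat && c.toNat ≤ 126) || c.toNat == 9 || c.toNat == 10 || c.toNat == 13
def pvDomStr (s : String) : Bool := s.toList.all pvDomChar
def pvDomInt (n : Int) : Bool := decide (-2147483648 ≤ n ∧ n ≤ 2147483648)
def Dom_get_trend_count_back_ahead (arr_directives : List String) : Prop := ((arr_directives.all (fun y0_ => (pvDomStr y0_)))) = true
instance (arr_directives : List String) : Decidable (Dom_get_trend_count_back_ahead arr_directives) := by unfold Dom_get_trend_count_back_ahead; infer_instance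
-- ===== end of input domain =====

-- B replaces A's full forward scan (last match wins) by a reversed scan with found-flags
-- that keeps the first match and breaks early once both counts are found (objective: alternative).

-- ===== PORT A =====
-- is_integer(s): int(s) succeeds
def pv_is_integer (s : String) : Bool := (PySem.Int.ofStr? s).isSome

def pvAStep (st : Int × Int) (d : String) : Int × Int :=
  if PySem.Str.startswith d "+" && pv_is_integer d then (st.1, (PySem.Int.ofStr? d).getD 0)
  else if PySem.Str.startswith d "-" && pv_is_integer d then ((PySem.Int.ofStr? d).getD 0, st.2)
  else st

def get_trend_count_back_ahead (arr_directives : List String) : Int × Int :=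
  arr_directives.foldl pvAStep (0, 0)

-- ===== PORT B =====
-- loop over reversed(arr_directives); state: (have_back, have_ahead, count_back, count_ahead); break when both found
def pvBLoop : List String → Bool → Bool → Int → Int → Int × Int
  | [], _, _, cb, ca => (cb, ca)
  | d :: rest, hb, ha, cb, ca =>
    let s : Bool × Bool × Int × Int :=
      if !ha && PySem.Str.startswith d "+" && pv_is_integer d then (hb, true, cb, (PySem.Int.ofStr? d).getD 0)
      else if !hb && PySem.Str.startswith d "-" && pv_is_integer d then (true, ha, (PySem.Int.ofStr? d).getD 0, ca)
      else (hb, ha, cb, ca)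
    if s.1 && s.2.1 then (s.2.2.1, s.2.2.2) else pvBLoop rest s.1 s.2.1 s.2.2.1 s.2.2.2

def get_trend_count_back_ahead_alt (arr_directives : List String) : Int × Int :=
  pvBLoop arr_directives.reverse false false 0 0

-- ===== PRECONDITION & SPEC =====
def Spec_get_trend_count_back_ahead (arr_directives : List String) (out : Int × Int) : Prop := out = get_trend_count_back_ahead_alt arr_directives
instance (arr_directives : List String) (out : Int × Int) : Decidable (Spec_get_trend_count_back_ahead arr_directives out) := by unfold Spec_get_trend_count_back_ahead; infer_instance

-- ===== CLAIM (what is proved, stated in full; the proofs are below) =====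
def Claim_equal_get_trend_count_back_ahead : Prop := ∀ (arr_directives : List String), Dom_get_trend_count_back_ahead arr_directives → Spec_get_trend_count_back_ahead arr_directives (get_trend_count_back_ahead arr_directives)

-- ===== LEMMAS AND PROOFS =====

-- first matching directive's int value in a list, with a default
def pvFirst (p : String → Bool) (r : List String) (dflt : Int) : Int :=
  match r.find? p with
  | some d => (PySem.Int.ofStr? d).getD 0
  | none => dflt

def pvIsPlus (d : String) : Bool := PySem.Str.startswith d "+" && pv_is_integer d
def pvIsMinus (d : String) : Bool := PySem.Str.startswith d "-" && pv_is_integer d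

theorem pv_excl (d : String) (c c' : Char) (hne : c' ≠ c)
    (h : PySem.Chars.startswith d.toList [c] = true) :
    PySem.Chars.startswith d.toList [c'] = false := by
  by_contra hm
  rw [Bool.not_eq_false] at hm
  rw [PySem.Chars.startswith_iff] at h hm
  obtain ⟨t1, e1⟩ := h
  obtain ⟨t2, e2⟩ := hm
  rw [← e1] at e2
  simp at e2
  exact hne e2.1

theorem pv_not_both (d : String)
    (h1 : PySem.Chars.startswith d.toList ['+'] = true ∧ pv_is_integer d = true)
    (h2 : PySem.Chars.startswith d.toList ['-'] = true ∧ pv_is_integer d = true) : False := by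
  have p1 := (PySem.Chars.startswith_iff _ _).mp h1.1
  have p2 := (PySem.Chars.startswith_iff _ _).mp h2.1
  obtain ⟨t1, e1⟩ := p1
  obtain ⟨t2, e2⟩ := p2
  rw [← e1] at e2
  simp at e2

theorem pvFirst_cons (p : String → Bool) (d : String) (r : List String) (dflt : Int) :
    pvFirst p (d :: r) dflt = if p d then (PySem.Int.ofStr? d).getD 0 else pvFirst p r dflt := by
  by_cases h : p d <;> simp [pvFirst, List.find?, h]

theorem pvFirst_append_singleton (p : String → Bool) (r : List String) (d : String) (dflt : Int) :
    pvFirst p (r ++ [d]) dflt = pvFirst p r (if p d then (PySem.Int.ofStr? d).getD 0 else dflt) := by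
  unfold pvFirst
  rw [List.find?_append]
  cases h : r.find? p <;> by_cases hd : p d <;> simp [hd, List.find?]

theorem pvA_char (l : List String) (st : Int × Int) :
    l.foldl pvAStep st = (pvFirst pvIsMinus l.reverse st.1, pvFirst pvIsPlus l.reverse st.2) := by
  induction l generalizing st with
  | nil => simp [pvFirst]
  | cons d l ih =>
    simp only [List.foldl_cons, List.reverse_cons]
    rw [ih, pvFirst_append_singleton, pvFirst_append_singleton]
    simp only [pvAStep, pvIsPlus, pvIsMinus]
    by_cases hP : PySem.Chars.startswith d.toList ['+'] = true ∧ pv_is_integer d = true <;>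
      by_cases hM : PySem.Chars.startswith d.toList ['-'] = true ∧ pv_is_integer d = true
    · exact (pv_not_both d hP hM).elim
    · simp [hP, pv_excl d '+' '-' (by decide) hP.1]
    · simp [hM, pv_excl d '-' '+' (by decide) hM.1]
    · simp [hP, hM]

theorem pvB_tf (r : List String) (cb ca : Int) :
    pvBLoop r true false cb ca = (cb, pvFirst pvIsPlus r ca) := by
  induction r generalizing ca with
  | nil => simp [pvBLoop, pvFirst]
  | cons d rest ih =>
    rw [pvFirst_cons]
    simp only [pvBLoop, pvIsPlus, Bool.not_false, Bool.true_and, Bool.not_true, Bool.false_and]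
    by_cases hP : PySem.Chars.startswith d.toList ['+'] = true ∧ pv_is_integer d = true
    · simp [hP]
    · simp [hP, ih]

theorem pvB_ft (r : List String) (cb ca : Int) :
    pvBLoop r false true cb ca = (pvFirst pvIsMinus r cb, ca) := by
  induction r generalizing cb with
  | nil => simp [pvBLoop, pvFirst]
  | cons d rest ih =>
    rw [pvFirst_cons]
    simp only [pvBLoop, pvIsMinus, Bool.not_false, Bool.true_and, Bool.not_true, Bool.false_and]
    by_cases hM : PySem.Chars.startswith d.toList ['-'] = true ∧ pv_is_integer d = true
    · simp [hM]
    · simp [hM, ih]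

theorem pvB_ff (r : List String) (cb ca : Int) :
    pvBLoop r false false cb ca = (pvFirst pvIsMinus r cb, pvFirst pvIsPlus r ca) := by
  induction r generalizing cb ca with
  | nil => simp [pvBLoop, pvFirst]
  | cons d rest ih =>
    rw [pvFirst_cons, pvFirst_cons]
    simp only [pvBLoop, pvIsPlus, pvIsMinus, Bool.not_false, Bool.true_and]
    by_cases hP : PySem.Chars.startswith d.toList ['+'] = true ∧ pv_is_integer d = true <;>
      by_cases hM : PySem.Chars.startswith d.toList ['-'] = true ∧ pv_is_integer d = true
    · exact (pv_not_both d hP hM).elim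
    · simp [hP, pvB_ft, pv_excl d '+' '-' (by decide) hP.1]
    · simp [hM, pvB_tf, pv_excl d '-' '+' (by decide) hM.1]
    · simp [hP, hM, ih]

-- ===== VERDICT (by name: the statement is the Claim_ definition above) =====
theorem get_trend_count_back_ahead_spec : Claim_equal_get_trend_count_back_ahead := by
  intro arr _
  unfold Spec_get_trend_count_back_ahead get_trend_count_back_ahead get_trend_count_back_ahead_alt
  rw [pvA_char, pvB_ff]
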